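-- pv_equiv track=rewrite | github.com/AlexPerazzo/AdventofCode2022 | Advent Of Code 2022/Fresh 11th, 2022.py | monkey1_throw
-- ===== SOURCE A (Python) =====
-- def monkey1_throw(monkey0_count, monkey0_list, monkey6_list, monkey2_list):
--     for item in monkey0_list:
--         value = 1 + item
--         while value > 10000000:
--             value = value - 9699690
--
--         if value % 3 == 0:
--             monkey6_list.append(value)
--         else:
--             monkey2_list.append(value)
--         monkey0_count += 1
--     monkey0_list.clear()
--
--     return monkey0_count, monkey0_list, monkey6_list, monkey2_list
-- ===== SOURCE B (Python) =====
-- def _adjust(item):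
--     value = 1 + item
--     if value > 10000000:
--         value -= 9699690 * ((value - 10000000 + 9699689) // 9699690)
--     return value
--
-- def monkey1_throw(monkey0_count, monkey0_list, monkey6_list, monkey2_list):
--     # staged passes: adjust all values once (closed-form reduction), then
--     # extend each target list with one filter pass
--     vals = [_adjust(item) for item in monkey0_list]
--     monkey6_list.extend(v for v in vals if v % 3 == 0)
--     monkey2_list.extend(v for v in vals if v % 3 != 0)
--     monkey0_count += len(monkey0_list)
--     monkey0_list.clear()
--     return monkey0_count, monkey0_list, monkey6_list, monkey2_list
-- ===== Notes on version B (the rewrite author's own statement) =====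
-- stated objective: alternative
-- what changed: A's single loop with a repeated-subtraction inner while and two accumulating appends is replaced by staged passes: one map applying a closed-form ceiling-division reduction, then two filter passes extending each target list, and one len() addition for the counter.
import Mathlib
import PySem

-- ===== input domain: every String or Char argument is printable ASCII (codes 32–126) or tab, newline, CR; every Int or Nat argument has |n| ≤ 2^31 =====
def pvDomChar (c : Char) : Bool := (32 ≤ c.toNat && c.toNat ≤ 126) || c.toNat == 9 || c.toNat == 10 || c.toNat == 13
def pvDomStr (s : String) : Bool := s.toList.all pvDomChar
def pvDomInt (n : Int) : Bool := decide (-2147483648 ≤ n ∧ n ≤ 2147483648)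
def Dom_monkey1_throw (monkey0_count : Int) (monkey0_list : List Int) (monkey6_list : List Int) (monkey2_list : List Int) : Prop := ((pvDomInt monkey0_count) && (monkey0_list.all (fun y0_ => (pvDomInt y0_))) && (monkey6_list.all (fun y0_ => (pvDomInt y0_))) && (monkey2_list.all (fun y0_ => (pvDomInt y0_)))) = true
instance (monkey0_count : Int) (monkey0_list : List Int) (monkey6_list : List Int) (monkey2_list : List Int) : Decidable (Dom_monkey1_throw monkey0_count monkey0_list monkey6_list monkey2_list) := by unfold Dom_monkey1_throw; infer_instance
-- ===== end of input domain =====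

-- B replaces A's single loop (repeated-subtraction inner while + two accumulating appends) by staged passes: one map with a closed-form reduction, then two filter passes; both Pythons mutate their list arguments in place, the equivalence proved is about the returned tuple.
-- ===== PORT A =====
def pvReduceA (v : Int) : Int :=
  if v > 10000000 then pvReduceA (v - 9699690) else v
  termination_by (v - 10000000).toNat
  decreasing_by omega

def pvLoopA (items : List Int) (c : Int) (m6 m2 : List Int) : Int × List Int × List Int :=
  match items with
  | [] => (c, m6, m2)
  | item :: rest =>
    let value := pvReduceA (1 + item)
    if PySem.Int.mod value 3 = 0 then pvLoopA rest (c + 1) (m6 ++ [value]) m2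
    else pvLoopA rest (c + 1) m6 (m2 ++ [value])

def monkey1_throw (monkey0_count : Int) (monkey0_list : List Int) (monkey6_list : List Int) (monkey2_list : List Int) : Int × List Int × List Int × List Int :=
  match pvLoopA monkey0_list monkey0_count monkey6_list monkey2_list with
  | (c, m6, m2) => (c, [], m6, m2)

-- ===== PORT B =====
def pvAdjust (item : Int) : Int :=
  let value := 1 + item
  if value > 10000000 then value - 9699690 * PySem.Int.floordiv (value - 10000000 + 9699689) 9699690
  else value

def monkey1_throw_alt (monkey0_count : Int) (monkey0_list : List Int) (monkey6_list : List Int) (monkey2_list : List Int) : Int × List Int × List Int × List Int :=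
  let vals := monkey0_list.map pvAdjust
  ( monkey0_count + monkey0_list.length
  , []
  , monkey6_list ++ vals.filter (fun v => PySem.Int.mod v 3 == 0)
  , monkey2_list ++ vals.filter (fun v => PySem.Int.mod v 3 != 0) )

-- ===== PRECONDITION & SPEC =====
def Spec_monkey1_throw (monkey0_count : Int) (monkey0_list : List Int) (monkey6_list : List Int) (monkey2_list : List Int) (out : Int × List Int × List Int × List Int) : Prop := out = monkey1_throw_alt monkey0_count monkey0_list monkey6_list monkey2_list
instance (monkey0_count : Int) (monkey0_list : List Int) (monkey6_list : List Int) (monkey2_list : List Int) (out : Int × List Int × List Int × List Int) : Decidable (Spec_monkey1_throw monkey0_count monkey0_list monkey6_list monkey2_list out) := by unfold Spec_monkey1_throw; infer_instance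

-- ===== CLAIM =====
def Claim_equal_monkey1_throw : Prop := ∀ (monkey0_count : Int) (monkey0_list : List Int) (monkey6_list : List Int) (monkey2_list : List Int), Dom_monkey1_throw monkey0_count monkey0_list monkey6_list monkey2_list → Spec_monkey1_throw monkey0_count monkey0_list monkey6_list monkey2_list (monkey1_throw monkey0_count monkey0_list monkey6_list monkey2_list)

-- ===== LEMMAS AND PROOFS =====
theorem pvReduce_eq (v : Int) : pvReduceA v = pvAdjust (v - 1) := by
  by_cases h : v > 10000000
  · rw [pvReduceA, if_pos h, pvReduce_eq (v - 9699690)]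
    simp only [pvAdjust, PySem.Int.floordiv_eq_ediv_of_pos (show (0:Int) < 9699690 by norm_num)]
    split_ifs <;> omega
  · rw [pvReduceA, if_neg h]
    simp only [pvAdjust]
    rw [if_neg (by omega)]
    omega
  termination_by (v - 10000000).toNat
  decreasing_by omega

theorem pvLoop_eq (l : List Int) (c : Int) (m6 m2 : List Int) :
    pvLoopA l c m6 m2 =
      (c + l.length,
       m6 ++ (l.map pvAdjust).filter (fun v => PySem.Int.mod v 3 == 0),
       m2 ++ (l.map pvAdjust).filter (fun v => PySem.Int.mod v 3 != 0)) := by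
  induction l generalizing c m6 m2 with
  | nil => simp [pvLoopA]
  | cons item rest ih =>
    have hv : pvReduceA (1 + item) = pvAdjust item := by
      have := pvReduce_eq (1 + item); simpa using this
    simp only [pvLoopA, hv, List.map_cons, List.filter_cons]
    rw [PySem.Int.mod_eq_emod_of_pos (by norm_num)]
    by_cases h : (pvAdjust item) % 3 = 0
    · rw [if_pos h, ih]
      simp [h, bne]
      omega
    · rw [if_neg h, ih]
      simp [h, bne]
      omega

-- ===== VERDICT =====
theorem monkey1_throw_spec : Claim_equal_monkey1_throw := by
  intro c l m6 m2 _
  unfold Spec_monkey1_throw monkey1_throw monkey1_throw_alt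
  rw [pvLoop_eq]
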